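-- pv_equiv track=rewrite | github.com/mikamo3/python_sandbox | atcoder/traveling.py | func
-- ===== SOURCE A (Python) =====
-- from typing import List
--
-- def func(plans: List[List[int]]):
--     """
--     >>> func([[3,1,2],[6,1,1]])
--     'Yes'
--     >>> func([[2,1,1],[3,2,1],[5,2,3],[7,3,4]])
--     'Yes'
--     >>> func([[2,100,100]])
--     'No'
--     >>> func([[5,1,1],[100,1,1]])
--     'No'
--     """
--     time = 0
--     current_x = 0
--     current_y = 0
--     for x in plans:
--         traveling_length = abs(x[1]-current_x)+abs(x[2]-current_y)
--         if x[0]-time-traveling_length < 0 or (x[0]-time-traveling_length) % 2 != 0: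
--             return 'No'
--         current_x = x[1]
--         current_y = x[2]
--         time = x[0]
--
--     return 'Yes'
-- ===== SOURCE B (Python) =====
-- from typing import List
--
-- def func(plans: List[List[int]]):
--     # Decoupled two-pass check. Parity: reaching (x,y) at time t from a point with
--     # even t+x+y requires t+x+y even (|dx|+|dy| has the parity of dx+dy), so starting
--     # from (0,0,0) the per-segment parity condition collapses to a POINTWISE test.
--     times = [p[0] for p in plans]
--     xs = [p[1] for p in plans]
--     ys = [p[2] for p in plans]
--     if any((t + x + y) % 2 != 0 for t, x, y in zip(times, xs, ys)):
--         return 'No'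
--     if any(t1 - t0 < abs(x1 - x0) + abs(y1 - y0)
--            for t0, t1, x0, x1, y0, y1
--            in zip([0] + times, times, [0] + xs, xs, [0] + ys, ys)):
--         return 'No'
--     return 'Yes'
-- ===== Notes on version B (the rewrite author's own statement) =====
-- stated objective: alternative
-- what changed: Replaces A's single stateful pass (time/current_x/current_y with per-segment distance+parity test) by two decoupled passes over extracted columns: the per-segment parity condition is collapsed, by the identity |dx|+|dy| ≡ dx+dy (mod 2) telescoped from the origin, into a pointwise test (t+x+y) % 2 == 0, and reachability t1-t0 >= |dx|+|dy| is checked separately over shifted columns.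
-- outside the precondition, e.g. on func([[1, 5, 5], [7]]): A returns 'No', B raises IndexError
import Mathlib
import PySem

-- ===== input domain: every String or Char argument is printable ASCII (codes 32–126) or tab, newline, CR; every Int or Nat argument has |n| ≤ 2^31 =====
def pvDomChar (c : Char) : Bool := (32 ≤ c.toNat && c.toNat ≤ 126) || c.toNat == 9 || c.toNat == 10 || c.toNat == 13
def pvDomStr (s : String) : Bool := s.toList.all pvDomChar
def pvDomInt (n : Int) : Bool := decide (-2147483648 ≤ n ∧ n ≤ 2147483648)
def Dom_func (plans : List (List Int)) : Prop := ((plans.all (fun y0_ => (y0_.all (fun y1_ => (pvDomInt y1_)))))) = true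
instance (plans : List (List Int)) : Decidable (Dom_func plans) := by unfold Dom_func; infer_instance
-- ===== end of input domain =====

-- B decouples A's single stateful pass into two staged passes over extracted columns:
-- parity is checked pointwise via (t+x+y) % 2 (telescoped from the origin), distance separately.


-- ===== PORT A =====
-- Python's abs(), shared by both ports
def pyAbs (a : Int) : Int := if a < 0 then -a else a

-- A's loop with state (time, current_x, current_y); x[i] as pyGetD (exact under Pre_func).
def funcLoop (time cx cy : Int) : List (List Int) → String
  | [] => "Yes"
  | x :: rest =>
    let t := PySem.List.pyGetD x 0 0
    let nx := PySem.List.pyGetD x 1 0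
    let ny := PySem.List.pyGetD x 2 0
    let tl := pyAbs (nx - cx) + pyAbs (ny - cy)
    if t - time - tl < 0 ∨ PySem.Int.mod (t - time - tl) 2 ≠ 0 then "No"
    else funcLoop t nx ny rest

def func (plans : List (List Int)) : String := funcLoop 0 0 0 plans

-- ===== PORT B =====
-- Source B: extract the three columns, then two independent `any` passes (pointwise parity, pairwise distance).
def func_alt (plans : List (List Int)) : String :=
  let times := plans.map (fun p => PySem.List.pyGetD p 0 0)
  let xs := plans.map (fun p => PySem.List.pyGetD p 1 0)
  let ys := plans.map (fun p => PySem.List.pyGetD p 2 0)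
  if (times.zip (xs.zip ys)).any (fun v => decide (PySem.Int.mod (v.1 + v.2.1 + v.2.2) 2 ≠ 0)) then "No"
  else if ((((0:Int) :: times).zip times).zip ((((0:Int) :: xs).zip xs).zip (((0:Int) :: ys).zip ys))).any
      (fun v => decide (v.1.2 - v.1.1 < pyAbs (v.2.1.2 - v.2.1.1) + pyAbs (v.2.2.2 - v.2.2.1))) then "No"
  else "Yes"

-- ===== PRECONDITION & SPEC =====
-- Pre_ excludes plans containing a sublist of fewer than 3 entries: indexing such a sublist raises
-- IndexError in B (and in A unless an earlier pair already failed, where A returns 'No').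
def Pre_func (plans : List (List Int)) : Prop := ∀ x ∈ plans, 3 ≤ x.length
instance (plans : List (List Int)) : Decidable (Pre_func plans) := by unfold Pre_func; infer_instance
def pvWitness_func : List (List Int) := [[3, 1, 2], [6, 1, 1]]

def Spec_func (plans : List (List Int)) (out : String) : Prop := out = func_alt plans
instance (plans : List (List Int)) (out : String) : Decidable (Spec_func plans out) := by unfold Spec_func; infer_instance

-- ===== CLAIM (what is proved, stated in full; the proofs are below) =====
def Claim_equal_func : Prop := ∀ (plans : List (List Int)), Dom_func plans → Pre_func plans → Spec_func plans (func plans)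

-- ===== LEMMAS AND PROOFS =====

-- B's parity pass, directly over plans
def parBad (plans : List (List Int)) : Bool :=
  plans.any (fun p => decide (PySem.Int.mod
    (PySem.List.pyGetD p 0 0 + PySem.List.pyGetD p 1 0 + PySem.List.pyGetD p 2 0) 2 ≠ 0))

-- B's distance pass, as a recursion carrying the previous triple
def distBad (t0 x0 y0 : Int) : List (List Int) → Bool
  | [] => false
  | p :: rest =>
    decide (PySem.List.pyGetD p 0 0 - t0 <
        pyAbs (PySem.List.pyGetD p 1 0 - x0) + pyAbs (PySem.List.pyGetD p 2 0 - y0))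
      || distBad (PySem.List.pyGetD p 0 0) (PySem.List.pyGetD p 1 0) (PySem.List.pyGetD p 2 0) rest

theorem mod_two_abs (a : Int) : PySem.Int.mod (pyAbs a) 2 = PySem.Int.mod a 2 := by
  rw [PySem.Int.mod_eq_emod_of_pos (by norm_num : (0:Int) < 2),
      PySem.Int.mod_eq_emod_of_pos (by norm_num : (0:Int) < 2)]
  unfold pyAbs
  split_ifs <;> omega

-- A's loop equals "no distance failure and no parity failure", provided the incoming state has even sum
theorem funcLoop_eq (rest : List (List Int)) :
    ∀ (t0 x0 y0 : Int), PySem.Int.mod (t0 + x0 + y0) 2 = 0 →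
      funcLoop t0 x0 y0 rest
        = (if distBad t0 x0 y0 rest || parBad rest then "No" else "Yes") := by
  induction rest with
  | nil => intro t0 x0 y0 _; simp [funcLoop, distBad, parBad]
  | cons p ps ih =>
    intro t0 x0 y0 hev
    have hfl : funcLoop t0 x0 y0 (p :: ps) =
        (if PySem.List.pyGetD p 0 0 - t0 -
              (pyAbs (PySem.List.pyGetD p 1 0 - x0) + pyAbs (PySem.List.pyGetD p 2 0 - y0)) < 0 ∨
            PySem.Int.mod (PySem.List.pyGetD p 0 0 - t0 -
              (pyAbs (PySem.List.pyGetD p 1 0 - x0) + pyAbs (PySem.List.pyGetD p 2 0 - y0))) 2 ≠ 0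
         then "No"
         else funcLoop (PySem.List.pyGetD p 0 0) (PySem.List.pyGetD p 1 0)
                (PySem.List.pyGetD p 2 0) ps) := rfl
    have hdb : distBad t0 x0 y0 (p :: ps) =
        (decide (PySem.List.pyGetD p 0 0 - t0 <
            pyAbs (PySem.List.pyGetD p 1 0 - x0) + pyAbs (PySem.List.pyGetD p 2 0 - y0))
          || distBad (PySem.List.pyGetD p 0 0) (PySem.List.pyGetD p 1 0)
               (PySem.List.pyGetD p 2 0) ps) := rfl
    have hpb : parBad (p :: ps) =
        (decide (PySem.Int.mod (PySem.List.pyGetD p 0 0 + PySem.List.pyGetD p 1 0 +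
            PySem.List.pyGetD p 2 0) 2 ≠ 0) || parBad ps) := rfl
    rw [hfl, hdb, hpb]
    set T := PySem.List.pyGetD p 0 0 with hT
    set X := PySem.List.pyGetD p 1 0 with hX
    set Y := PySem.List.pyGetD p 2 0 with hY
    have h1 : pyAbs (X - x0) % 2 = (X - x0) % 2 := by
      have := mod_two_abs (X - x0)
      rwa [PySem.Int.mod_eq_emod_of_pos (by norm_num : (0:Int) < 2),
           PySem.Int.mod_eq_emod_of_pos (by norm_num : (0:Int) < 2)] at this
    have h2 : pyAbs (Y - y0) % 2 = (Y - y0) % 2 := by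
      have := mod_two_abs (Y - y0)
      rwa [PySem.Int.mod_eq_emod_of_pos (by norm_num : (0:Int) < 2),
           PySem.Int.mod_eq_emod_of_pos (by norm_num : (0:Int) < 2)] at this
    rw [PySem.Int.mod_eq_emod_of_pos (by norm_num : (0:Int) < 2)] at hev
    have hpar : PySem.Int.mod (T - t0 - (pyAbs (X - x0) + pyAbs (Y - y0))) 2 = 0
        ↔ PySem.Int.mod (T + X + Y) 2 = 0 := by
      rw [PySem.Int.mod_eq_emod_of_pos (by norm_num : (0:Int) < 2),
          PySem.Int.mod_eq_emod_of_pos (by norm_num : (0:Int) < 2)]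
      omega
    by_cases hd : T - t0 < pyAbs (X - x0) + pyAbs (Y - y0)
    · rw [if_pos (Or.inl (by omega))]
      simp [hd]
    · by_cases hp : PySem.Int.mod (T + X + Y) 2 = 0
      · rw [if_neg (not_or.mpr ⟨by omega, not_not.mpr (hpar.mpr hp)⟩), ih T X Y hp]
        have hp' : (T + X + Y) % 2 = 0 := by
          rwa [PySem.Int.mod_eq_emod_of_pos (by norm_num : (0:Int) < 2)] at hp
        simp [hd, hp']
      · rw [if_pos (Or.inr (fun h => hp (hpar.mp h)))]
        have hdec : decide (PySem.Int.mod (T + X + Y) 2 ≠ 0) = true := by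
          simpa using hp
        rw [hdec]
        simp

-- B's zipped column passes are the direct recursions above
theorem parZip_eq (plans : List (List Int)) :
    (((plans.map (fun p => PySem.List.pyGetD p 0 0)).zip
        ((plans.map (fun p => PySem.List.pyGetD p 1 0)).zip
         (plans.map (fun p => PySem.List.pyGetD p 2 0)))).any
        (fun v => decide (PySem.Int.mod (v.1 + v.2.1 + v.2.2) 2 ≠ 0)))
      = parBad plans := by
  induction plans with
  | nil => rfl
  | cons p ps ih => simp only [List.map_cons, List.zip_cons_cons, List.any_cons, ih, parBad]

theorem distZip_eq (plans : List (List Int)) :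
    ∀ (t0 x0 y0 : Int),
      ((((t0 :: plans.map (fun p => PySem.List.pyGetD p 0 0)).zip
            (plans.map (fun p => PySem.List.pyGetD p 0 0))).zip
          (((x0 :: plans.map (fun p => PySem.List.pyGetD p 1 0)).zip
              (plans.map (fun p => PySem.List.pyGetD p 1 0))).zip
           ((y0 :: plans.map (fun p => PySem.List.pyGetD p 2 0)).zip
              (plans.map (fun p => PySem.List.pyGetD p 2 0))))).any
        (fun v => decide (v.1.2 - v.1.1 < pyAbs (v.2.1.2 - v.2.1.1) + pyAbs (v.2.2.2 - v.2.2.1))))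
      = distBad t0 x0 y0 plans := by
  induction plans with
  | nil => intro _ _ _; rfl
  | cons p ps ih =>
    intro t0 x0 y0
    simp only [List.map_cons, List.zip_cons_cons, List.any_cons, distBad, ih]

-- ===== VERDICT (by name: the statement is the Claim_ definition above) =====
theorem func_spec : Claim_equal_func := by
  intro plans _ _
  unfold Spec_func func func_alt
  rw [funcLoop_eq plans 0 0 0 (by decide)]
  simp only [parZip_eq plans, distZip_eq plans 0 0 0]
  cases hd : distBad 0 0 0 plans <;> cases hp : parBad plans <;> simp [hd, hp]
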